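-- pv_equiv track=rewrite | github.com/erickrodrigs/daily-coding-problems | src/problem167.py | find_pairs_of_palindromes
-- ===== SOURCE A (Python) =====
-- def find_pairs_of_palindromes(list):
--     def compare_two_words(word_a, word_b):
--         concatenated_word = word_a + word_b
--         reversed_concatenated = concatenated_word[::-1]
--         return concatenated_word == reversed_concatenated
--
--     pairs = []
--
--     for i in range(len(list)):
--         for j in range(i + 1, len(list)):
--             if compare_two_words(list[i], list[j]):
--                 pairs.append((i, j))
--             if compare_two_words(list[j], list[i]):
--                 pairs.append((j, i))
--
--     return pairs
-- ===== SOURCE B (Python) =====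
-- def find_pairs_of_palindromes(list):
--     def is_pal_pair(a, b):
--         # palindrome test on the logical concatenation a+b: two symmetric
--         # cursors across the two words; no concatenated or reversed copy is built
--         n = len(a) + len(b)
--         for k in range(n // 2):
--             x = a[k] if k < len(a) else b[k - len(a)]
--             m = n - 1 - k
--             y = a[m] if m < len(a) else b[m - len(a)]
--             if x != y:
--                 return False
--         return True
--
--     pairs = []
--     i = 0
--     rest = list
--     while rest:
--         a, rest = rest[0], rest[1:]
--         j = i + 1
--         for b in rest:
--             if is_pal_pair(a, b):
--                 pairs.append((i, j))
--             if is_pal_pair(b, a):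
--                 pairs.append((j, i))
--             j += 1
--         i += 1
--     return pairs
-- ===== Notes on version B (the rewrite author's own statement) =====
-- stated objective: alternative
-- what changed: B walks suffix tails of the list with head/tail state instead of A's nested index ranges, and tests each pair with a two-cursor half-scan across the two words, never building the concatenated string or its reversed copy as A does.
import Mathlib
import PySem

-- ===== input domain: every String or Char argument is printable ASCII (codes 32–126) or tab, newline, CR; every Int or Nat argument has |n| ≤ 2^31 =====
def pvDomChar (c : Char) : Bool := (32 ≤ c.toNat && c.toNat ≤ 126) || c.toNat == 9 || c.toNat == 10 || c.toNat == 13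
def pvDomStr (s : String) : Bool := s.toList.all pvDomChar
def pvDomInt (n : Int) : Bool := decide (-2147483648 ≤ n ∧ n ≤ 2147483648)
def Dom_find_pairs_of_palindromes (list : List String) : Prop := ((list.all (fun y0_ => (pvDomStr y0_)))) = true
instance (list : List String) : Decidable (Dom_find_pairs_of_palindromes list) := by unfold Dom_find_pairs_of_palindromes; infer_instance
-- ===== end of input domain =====

-- B replaces A's nested index loops by a head/tail walk over suffixes and tests each
-- pair with a two-cursor half-scan across the two words (no concatenated/reversed copy).

-- ===== PORT A =====
def fpopCompare (wa wb : String) : Bool :=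
  let cw : List Char := wa.toList ++ wb.toList
  let rev : List Char := (PySem.List.slice? cw none none (-1)).getD []
  cw == rev

def find_pairs_of_palindromes (list : List String) : List (Int × Int) :=
  (PySem.List.pyRange 0 (list.length : Int) 1).foldl (fun pairs i =>
    (PySem.List.pyRange (i + 1) (list.length : Int) 1).foldl (fun pairs j =>
      let pairs := if fpopCompare (PySem.List.pyGetD list i "") (PySem.List.pyGetD list j "") then pairs ++ [(i, j)] else pairs
      if fpopCompare (PySem.List.pyGetD list j "") (PySem.List.pyGetD list i "") then pairs ++ [(j, i)] else pairs) pairs) []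

-- ===== PORT B =====
def altCh (a b : List Char) (k : Nat) : Char :=
  if k < a.length then a.getD k ' ' else b.getD (k - a.length) ' '

def altIsPal (a b : List Char) : Bool :=
  let n := a.length + b.length
  (List.range (n / 2)).all (fun k => altCh a b k == altCh a b (n - 1 - k))

def altInner (i : Int) (a : List Char) (j : Int) (rest : List String) (pairs : List (Int × Int)) : List (Int × Int) :=
  match rest with
  | [] => pairs
  | b :: rest' =>
    let bl := b.toList
    let pairs := if altIsPal a bl then pairs ++ [(i, j)] else pairs
    let pairs := if altIsPal bl a then pairs ++ [(j, i)] else pairs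
    altInner i a (j + 1) rest' pairs

def altOuter (i : Int) (words : List String) (pairs : List (Int × Int)) : List (Int × Int) :=
  match words with
  | [] => pairs
  | w :: ws => altOuter (i + 1) ws (altInner i w.toList (i + 1) ws pairs)

def find_pairs_of_palindromes_alt (list : List String) : List (Int × Int) :=
  altOuter 0 list []

-- ===== PRECONDITION & SPEC =====
def Spec_find_pairs_of_palindromes (list : List String) (out : List (Int × Int)) : Prop := out = find_pairs_of_palindromes_alt list
instance (list : List String) (out : List (Int × Int)) : Decidable (Spec_find_pairs_of_palindromes list out) := by unfold Spec_find_pairs_of_palindromes; infer_instance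

-- ===== CLAIM (what is proved, stated in full; the proofs are below) =====
def Claim_equal_find_pairs_of_palindromes : Prop := ∀ (list : List String), Dom_find_pairs_of_palindromes list → Spec_find_pairs_of_palindromes list (find_pairs_of_palindromes list)

-- ===== LEMMAS AND PROOFS =====

lemma altCh_eq (a b : List Char) (k : Nat) : altCh a b k = (a ++ b).getD k ' ' := by
  unfold altCh
  split_ifs with h
  · exact (List.getD_append a b ' ' k h).symm
  · exact (List.getD_append_right a b ' ' k (by omega)).symm

lemma halfPal (l : List Char) :
    ((List.range (l.length / 2)).all (fun k => l.getD k ' ' == l.getD (l.length - 1 - k) ' '))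
      = (l == l.reverse) := by
  rw [Bool.eq_iff_iff]
  simp only [List.all_eq_true, List.mem_range, beq_iff_eq]
  constructor
  · intro h
    apply List.ext_getElem (by simp)
    intro i h1 h2
    rw [List.getElem_reverse]
    by_cases hi : i < l.length / 2
    · have := h i hi
      rwa [List.getD_eq_getElem l ' ' h1, List.getD_eq_getElem l ' ' (by omega)] at this
    · by_cases hj : l.length - 1 - i < l.length / 2
      · have := h _ hj
        rw [List.getD_eq_getElem l ' ' (by omega), List.getD_eq_getElem l ' ' (by omega)] at this
        simp only [show l.length - 1 - (l.length - 1 - i) = i from by omega] at this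
        exact this.symm
      · have hmid : i = l.length - 1 - i := by omega
        simp only [show l.length - 1 - i = i from hmid.symm]
  · intro h k hk
    have hrev : l.reverse.getD k ' ' = l.getD (l.length - 1 - k) ' ' := by
      rw [List.getD_eq_getElem l.reverse ' ' (by simp; omega),
        List.getD_eq_getElem l ' ' (by omega), List.getElem_reverse]
    rw [← hrev, ← h]

lemma check_eq (wa wb : String) : fpopCompare wa wb = altIsPal wa.toList wb.toList := by
  unfold fpopCompare altIsPal
  simp only [PySem.List.slice?_none_none_neg_one, Option.getD_some, altCh_eq,
    ← List.length_append]
  exact (halfPal (wa.toList ++ wb.toList)).symm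

lemma innerA (list : List String) (i : Int) (wi : String) :
    ∀ (k t : Nat), list.length - t = k → ∀ (pairs : List (Int × Int)),
    (PySem.List.pyRange (t : Int) (list.length : Int) 1).foldl
      (fun pairs j =>
        let pairs := if fpopCompare wi (PySem.List.pyGetD list j "") then pairs ++ [(i, j)] else pairs
        if fpopCompare (PySem.List.pyGetD list j "") wi then pairs ++ [(j, i)] else pairs) pairs
      = altInner i wi.toList (t : Int) (list.drop t) pairs := by
  intro k
  induction k with
  | zero =>
    intro t ht pairs
    rw [PySem.List.pyRange_one_eq_nil (by exact_mod_cast Nat.le_of_sub_eq_zero ht),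
      List.foldl_nil, List.drop_eq_nil_of_le (by omega)]
    rfl
  | succ k ih =>
    intro t ht pairs
    have hlt : t < list.length := by omega
    rw [PySem.List.pyRange_one_cons (by exact_mod_cast hlt), List.foldl_cons,
      List.drop_eq_getElem_cons hlt]
    have hget : PySem.List.pyGetD list (t : Int) "" = list[t] := by
      rw [PySem.List.pyGetD_natCast, List.getD_eq_getElem list "" hlt]
    simp only [altInner, hget, ← check_eq]
    have hc : ((t : Int) + 1) = ((t + 1 : Nat) : Int) := by push_cast; ring
    rw [hc]
    exact ih (t + 1) (by omega) _

lemma outerA (list : List String) :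
    ∀ (k t : Nat), list.length - t = k → ∀ (pairs : List (Int × Int)),
    (PySem.List.pyRange (t : Int) (list.length : Int) 1).foldl
      (fun pairs i =>
        (PySem.List.pyRange (i + 1) (list.length : Int) 1).foldl
          (fun pairs j =>
            let pairs := if fpopCompare (PySem.List.pyGetD list i "") (PySem.List.pyGetD list j "") then pairs ++ [(i, j)] else pairs
            if fpopCompare (PySem.List.pyGetD list j "") (PySem.List.pyGetD list i "") then pairs ++ [(j, i)] else pairs) pairs) pairs
      = altOuter (t : Int) (list.drop t) pairs := by
  intro k
  induction k with
  | zero =>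
    intro t ht pairs
    rw [PySem.List.pyRange_one_eq_nil (by exact_mod_cast Nat.le_of_sub_eq_zero ht),
      List.foldl_nil, List.drop_eq_nil_of_le (by omega)]
    rfl
  | succ k ih =>
    intro t ht pairs
    have hlt : t < list.length := by omega
    rw [PySem.List.pyRange_one_cons (by exact_mod_cast hlt), List.foldl_cons,
      List.drop_eq_getElem_cons hlt]
    have hget : PySem.List.pyGetD list (t : Int) "" = list[t] := by
      rw [PySem.List.pyGetD_natCast, List.getD_eq_getElem list "" hlt]
    simp only [altOuter, hget]
    have hc : ((t : Int) + 1) = ((t + 1 : Nat) : Int) := by push_cast; ring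
    rw [hc, innerA list (t : Int) list[t] (list.length - (t + 1)) (t + 1) rfl pairs]
    exact ih (t + 1) (by omega) _

-- ===== VERDICT (by name: the statement is the Claim_ definition above) =====
theorem find_pairs_of_palindromes_spec : Claim_equal_find_pairs_of_palindromes := by
  intro list _
  unfold Spec_find_pairs_of_palindromes find_pairs_of_palindromes find_pairs_of_palindromes_alt
  have h := outerA list list.length 0 (by omega) []
  simpa using h
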